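-- pv_equiv track=rewrite | github.com/dojofinancier/4as | scripts/articles/add_external_links.py | find_link_positions
-- ===== SOURCE A (Python) =====
-- from typing import Dict, List, Optional, Tuple
--
-- def find_link_positions(content: str, position_descriptions: List[str]) -> List[int]:
--     """Find approximate character positions for links."""
--     positions = []
--     content_lower = content.lower()
--
--     for desc in position_descriptions:
--         keywords = desc.lower().split()
--         best_pos = -1
--         best_score = 0
--
--         for i in range(len(content_lower) - 50):
--             window = content_lower[i:i+200]
--             score = sum(1 for kw in keywords if kw in window)
--             if score > best_score:
--                 best_score = score
--                 best_pos = i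
--
--         if best_pos >= 0:
--             positions.append(best_pos)
--         else:
--             positions.append(len(content) // (len(position_descriptions) + 1) * (len(positions) + 1))
--
--     return positions
-- ===== SOURCE B (Python) =====
-- def find_link_positions(content, position_descriptions):
--     """Find approximate character positions for links (difference-array re-implementation)."""
--     cl = content.lower()
--     n = len(content)
--     limit = n - 50
--     positions = []
--     for desc in position_descriptions:
--         keywords = desc.lower().split()
--         diff = [0] * (limit + 1) if limit > 0 else []
--         for kw in keywords:
--             k = len(kw)
--             occs = []
--             j = cl.find(kw)
--             while j != -1:
--                 occs.append(j)
--                 j = cl.find(kw, j + 1)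
--             prev_hi = -1
--             for j in occs:
--                 lo = max(0, j + k - 200, prev_hi + 1)
--                 if lo <= j and lo < limit:
--                     diff[lo] += 1
--                     diff[min(j, limit - 1) + 1] -= 1
--                 prev_hi = j
--         best_pos, best_score, cur = -1, 0, 0
--         for i in range(limit):
--             cur += diff[i]
--             if cur > best_score:
--                 best_score, best_pos = cur, i
--         if best_pos >= 0:
--             positions.append(best_pos)
--         else:
--             positions.append(n // (len(position_descriptions) + 1) * (len(positions) + 1))
--     return positions
-- ===== Notes on version B (the rewrite author's own statement) =====
-- stated objective: faster
-- what changed: Instead of extracting a 200-char window at every start position and substring-searching every keyword in it, B enumerates each keyword's occurrences once with str.find, converts them into clipped disjoint window-start intervals accumulated in a +1/-1 difference array, and then finds the first strict-maximum window in one prefix-sum sweep.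
import Mathlib
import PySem

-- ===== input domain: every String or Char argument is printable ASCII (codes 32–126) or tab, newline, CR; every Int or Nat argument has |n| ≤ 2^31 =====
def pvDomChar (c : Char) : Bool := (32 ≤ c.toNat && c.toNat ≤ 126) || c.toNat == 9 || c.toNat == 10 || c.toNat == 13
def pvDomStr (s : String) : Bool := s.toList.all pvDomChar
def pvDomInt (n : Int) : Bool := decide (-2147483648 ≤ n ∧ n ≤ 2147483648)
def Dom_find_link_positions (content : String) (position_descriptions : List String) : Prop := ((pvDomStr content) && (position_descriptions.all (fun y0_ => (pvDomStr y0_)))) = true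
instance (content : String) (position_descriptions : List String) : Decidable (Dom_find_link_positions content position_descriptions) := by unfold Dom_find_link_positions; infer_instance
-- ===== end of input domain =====

-- B replaces A's per-window substring scans by one find-based occurrence enumeration per keyword,
-- clipped-interval difference-array accumulation, and a single prefix-sum sweep (measured faster; same return values).
-- ===== PORT A =====
def find_link_positions (content : String) (position_descriptions : List String) : List Int :=
  let content_lower := PySem.Str.lower content
  position_descriptions.foldl (fun positions desc =>
    let keywords := PySem.Str.split₀ (PySem.Str.lower desc)
    let best := (PySem.List.pyRange 0 (PySem.Str.len content_lower - 50) 1).foldl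
      (fun (st : Int × Int) (i : Int) =>
        let window := PySem.Str.slice content_lower (some i) (some (i + 200))
        let score : Int := (keywords.map (fun kw => if PySem.Str.isIn kw window then (1 : Int) else 0)).sum
        if st.2 < score then (i, score) else st) (-1, 0)
    if 0 ≤ best.1 then positions ++ [best.1]
    else positions ++ [PySem.Int.floordiv (PySem.Str.len content) (PySem.List.len position_descriptions + 1) * (PySem.List.len positions + 1)]) []

-- ===== PORT B =====
-- occurrence positions of kw in cl, ascending, via repeated str.find (fuel only makes the
-- Python while-loop total; it is never exhausted since find from start j+1 returns -1 or > j)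
def pvOccsGo (cl kw : String) (fuel : Nat) (j : Int) : List Int :=
  match fuel with
  | 0 => []
  | fuel + 1 => if j = -1 then [] else j :: pvOccsGo cl kw fuel (PySem.Str.findFrom cl kw (j + 1) none)

-- one occurrence j: add +1/-1 difference marks for the clipped window-start interval
def pvAddIntervals (limit k : Int) (st : List Int × Int) (j : Int) : List Int × Int :=
  let lo := max (max 0 (j + k - 200)) (st.2 + 1)
  if lo ≤ j ∧ lo < limit then
    let d1 := PySem.List.pySetD st.1 lo (PySem.List.pyGetD st.1 lo 0 + 1)
    let d2 := PySem.List.pySetD d1 (min j (limit - 1) + 1) (PySem.List.pyGetD d1 (min j (limit - 1) + 1) 0 - 1)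
    (d2, j)
  else (st.1, j)

def find_link_positions_alt (content : String) (position_descriptions : List String) : List Int :=
  let cl := PySem.Str.lower content
  let n := PySem.Str.len content
  let limit := n - 50
  position_descriptions.foldl (fun positions desc =>
    let keywords := PySem.Str.split₀ (PySem.Str.lower desc)
    let diff0 : List Int := if 0 < limit then List.replicate (limit + 1).toNat 0 else []
    let diff := keywords.foldl (fun d kw =>
      let occs := pvOccsGo cl kw (n + 2).toNat (PySem.Str.find cl kw)
      (occs.foldl (pvAddIntervals limit (PySem.Str.len kw)) (d, -1)).1) diff0
    let r := (PySem.List.pyRange 0 limit 1).foldl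
      (fun (st : Int × Int × Int) (i : Int) =>
        let cur := st.2.2 + PySem.List.pyGetD diff i 0
        if st.2.1 < cur then (i, cur, cur) else (st.1, st.2.1, cur)) (-1, 0, 0)
    if 0 ≤ r.1 then positions ++ [r.1]
    else positions ++ [PySem.Int.floordiv n (PySem.List.len position_descriptions + 1) * (PySem.List.len positions + 1)]) []

-- ===== PRECONDITION & SPEC =====
def Spec_find_link_positions (content : String) (position_descriptions : List String) (out : List Int) : Prop := out = find_link_positions_alt content position_descriptions
instance (content : String) (position_descriptions : List String) (out : List Int) : Decidable (Spec_find_link_positions content position_descriptions out) := by unfold Spec_find_link_positions; infer_instance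

-- ===== CLAIM (what is proved, stated in full; the proofs are below) =====
def Claim_equal_find_link_positions : Prop := ∀ (content : String) (position_descriptions : List String), Dom_find_link_positions content position_descriptions → Spec_find_link_positions content position_descriptions (find_link_positions content position_descriptions)


-- ===== LEMMAS AND PROOFS =====

-- ---- proof-side helper definitions ----

/-- occurrence positions `j ≥ s` of `kwl` in `cll`, ascending. -/
def pvOccsFrom (cll kwl : List Char) (s : Nat) : List Nat :=
  (List.range (cll.length + 1)).filter (fun j => s ≤ j && decide (kwl <+: cll.drop j))

/-- prefix sum of the first `m` entries of the difference array. -/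
def pvPsum (d : List Int) (m : Nat) : Int := (d.take m).sum

-- ---- small facts ----

theorem pv_lower_length (s : String) :
    (PySem.Str.lower s).toList.length = s.toList.length := by
  simp [PySem.Str.toList_lower, PySem.Chars.lower]

theorem pv_split0_go_ne_nil (s : List Char) : ∀ (cur : List Char) (acc : List (List Char)),
    (∀ w ∈ acc, w ≠ []) → ∀ w ∈ PySem.Chars.split₀.go s cur acc, w ≠ [] := by
  induction s with
  | nil =>
    intro cur acc hacc w hw
    rw [PySem.Chars.split₀.go] at hw
    by_cases hc : cur.isEmpty
    · simp only [hc, if_true, List.mem_reverse] at hw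
      exact hacc w hw
    · rw [if_neg (by simpa using hc), List.mem_reverse, List.mem_cons] at hw
      rcases hw with hw | hw
      · subst hw
        simp only [ne_eq, List.reverse_eq_nil_iff]
        simpa [List.isEmpty_iff] using hc
      · exact hacc w hw
  | cons c rest ih =>
    intro cur acc hacc w hw
    rw [PySem.Chars.split₀.go] at hw
    by_cases hsp : PySem.Chars.isspace c
    · by_cases hc : cur.isEmpty
      · rw [if_pos hsp, if_pos hc] at hw
        exact ih [] acc hacc w hw
      · rw [if_pos hsp, if_neg (by simpa using hc)] at hw
        refine ih [] (cur.reverse :: acc) ?_ w hw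
        intro w' hw'
        rcases List.mem_cons.1 hw' with hw' | hw'
        · subst hw'
          simp only [ne_eq, List.reverse_eq_nil_iff]
          simpa [List.isEmpty_iff] using hc
        · exact hacc w' hw'
    · rw [if_neg (by simpa using hsp)] at hw
      exact ih (c :: cur) acc hacc w hw

theorem pv_split0_ne_nil (s kw : String) (h : kw ∈ PySem.Str.split₀ s) : kw.toList ≠ [] := by
  rw [PySem.Str.split₀, List.mem_map] at h
  obtain ⟨w, hw, rfl⟩ := h
  rw [String.toList_ofList]
  exact pv_split0_go_ne_nil s.toList [] [] (by simp) w hw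

theorem pv_window_iff (cll kwl : List Char) (i : Nat) :
    kwl <:+: List.take 200 (List.drop i cll) ↔
      ∃ j : Nat, i ≤ j ∧ j + kwl.length ≤ i + 200 ∧ kwl <+: cll.drop j := by
  constructor
  · intro h
    obtain ⟨t, ht⟩ := (PySem.Chars.exists_prefix_drop_iff_isIn kwl _).2
      ((PySem.Chars.isIn_iff_infix kwl _).2 h)
    rw [List.drop_take, List.drop_drop] at ht
    obtain ⟨hpre, hlen⟩ := List.prefix_take_iff.1 ht
    by_cases ht2 : t ≤ 200
    · exact ⟨i + t, by omega, by omega, hpre⟩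
    · have hk0 : kwl = [] := by
        have : kwl.length = 0 := by omega
        exact List.eq_nil_of_length_eq_zero this
      subst hk0
      exact ⟨i, le_refl _, by simp, List.nil_prefix⟩
  · rintro ⟨j, hij, hjk, hpre⟩
    apply (PySem.Chars.isIn_iff_infix kwl _).1
    apply (PySem.Chars.exists_prefix_drop_iff_isIn kwl _).1
    refine ⟨j - i, ?_⟩
    rw [List.drop_take, List.drop_drop]
    have hji : i + (j - i) = j := by omega
    rw [hji]
    exact List.prefix_take_iff.2 ⟨hpre, by omega⟩

theorem pv_mem_occsFrom (cll kwl : List Char) (s j : Nat) :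
    j ∈ pvOccsFrom cll kwl s ↔ j ≤ cll.length ∧ s ≤ j ∧ kwl <+: cll.drop j := by
  simp only [pvOccsFrom, List.mem_filter, List.mem_range, Nat.lt_succ_iff, decide_eq_true_eq,
    Bool.and_eq_true]

theorem pv_occsFrom_sorted (cll kwl : List Char) (s : Nat) :
    (pvOccsFrom cll kwl s).Pairwise (· < ·) :=
  List.Pairwise.sublist List.filter_sublist List.pairwise_lt_range

theorem pv_occsFrom_cons (cll kwl : List Char) (s j0 : Nat)
    (hs : s ≤ j0) (hj0 : j0 ≤ cll.length)
    (hmin : ∀ i, s ≤ i → i < j0 → ¬ kwl <+: cll.drop i)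
    (hpre : kwl <+: cll.drop j0) :
    pvOccsFrom cll kwl s = j0 :: pvOccsFrom cll kwl (j0 + 1) := by
  have hN1 : cll.length + 1 = (j0 + 1) + (cll.length - j0) := by omega
  unfold pvOccsFrom
  rw [hN1, List.range_add, List.filter_append, List.filter_append, List.range_succ,
    List.filter_append, List.filter_append]
  have h1 : ∀ s' : Nat, j0 < s' → (List.range j0).filter
      (fun j => s' ≤ j && decide (kwl <+: cll.drop j)) = [] := by
    intro s' hs'
    rw [List.filter_eq_nil_iff]
    intro j hj
    simp only [List.mem_range] at hj
    simp only [Bool.and_eq_true, decide_eq_true_eq, not_and]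
    intro hsj
    omega
  have h1s : (List.range j0).filter (fun j => s ≤ j && decide (kwl <+: cll.drop j)) = [] := by
    rw [List.filter_eq_nil_iff]
    intro j hj
    simp only [List.mem_range] at hj
    simp only [Bool.and_eq_true, decide_eq_true_eq, not_and]
    intro hsj
    exact hmin j hsj hj
  have h2 : [j0].filter (fun j => s ≤ j && decide (kwl <+: cll.drop j)) = [j0] := by
    simp [hs, hpre]
  have h2' : [j0].filter (fun j => j0 + 1 ≤ j && decide (kwl <+: cll.drop j)) = [] := by
    simp
  have h3 : ∀ x ∈ (List.range (cll.length - j0)).map (fun x => j0 + 1 + x),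
      ((s ≤ x && decide (kwl <+: cll.drop x)) = (j0 + 1 ≤ x && decide (kwl <+: cll.drop x))) := by
    intro x hx
    simp only [List.mem_map, List.mem_range] at hx
    obtain ⟨y, _, rfl⟩ := hx
    have hs1 : s ≤ j0 + 1 + y := by omega
    have hs2 : j0 + 1 ≤ j0 + 1 + y := by omega
    simp [hs1, hs2]
  rw [h1s, h1 (j0 + 1) (by omega), h2, h2', List.filter_congr h3]
  simp

theorem pv_occsFrom_nil (cll kwl : List Char) (s : Nat)
    (h : ∀ i, s ≤ i → ¬ kwl <+: cll.drop i) :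
    pvOccsFrom cll kwl s = [] := by
  unfold pvOccsFrom
  rw [List.filter_eq_nil_iff]
  intro j hj
  simp only [Bool.and_eq_true, decide_eq_true_eq, not_and]
  intro hsj
  exact h j hsj

theorem pv_occsGo_spec (cl kw : String) (hkw : kw.toList ≠ []) :
    ∀ (fuel s : Nat), s ≤ cl.toList.length → cl.toList.length - s < fuel →
    pvOccsGo cl kw fuel (PySem.Chars.findFrom cl.toList kw.toList (s : Int) none) =
      List.map (Nat.cast : Nat → Int) (pvOccsFrom cl.toList kw.toList s) := by
  intro fuel
  induction fuel with
  | zero => intro s hs hf; omega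
  | succ fuel ih =>
    intro s hs hf
    by_cases hr : PySem.Chars.findFrom cl.toList kw.toList (s : Int) none = -1
    · have hinf := (PySem.Chars.findFrom_natCast_eq_neg_one_iff cl.toList kw.toList s hs).1 hr
      rw [pv_occsFrom_nil]
      · simp [pvOccsGo, hr]
      · intro i hsi hpre
        apply hinf
        apply (PySem.Chars.isIn_iff_infix _ _).1
        apply (PySem.Chars.exists_prefix_drop_iff_isIn _ _).1
        refine ⟨i - s, ?_⟩
        rw [List.drop_drop]
        have : s + (i - s) = i := by omega
        rw [this]
        exact hpre
    · obtain ⟨hsr, hpre, hmin⟩ := PySem.Chars.findFrom_natCast_spec cl.toList kw.toList s hs hr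
      have h0r : (0 : Int) ≤ PySem.Chars.findFrom cl.toList kw.toList (s : Int) none :=
        le_trans (Int.natCast_nonneg s) hsr
      set r := PySem.Chars.findFrom cl.toList kw.toList (s : Int) none with hrdef
      have hrn : r = ((r.toNat : Nat) : Int) := (Int.toNat_of_nonneg h0r).symm
      have hkl : 0 < kw.toList.length := List.length_pos_of_ne_nil hkw
      have hj0 : r.toNat + kw.toList.length ≤ cl.toList.length := by
        have hl := hpre.length_le
        simp only [List.length_drop] at hl
        omega
      have hsj0 : s ≤ r.toNat := by
        have : (s : Int) ≤ ((r.toNat : Nat) : Int) := hrn ▸ hsr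
        exact_mod_cast this
      have hstep : pvOccsGo cl kw (fuel + 1) r =
          r :: pvOccsGo cl kw fuel (PySem.Str.findFrom cl kw (r + 1) none) := by
        rw [pvOccsGo]
        simp [hr]
      rw [hstep]
      have hr1 : r + 1 = ((r.toNat + 1 : Nat) : Int) := by omega
      rw [PySem.Str.findFrom_eq, hr1, ih (r.toNat + 1) (by omega) (by omega)]
      rw [pv_occsFrom_cons cl.toList kw.toList s r.toNat hsj0 (by omega)
        (fun i hsi hlt => hmin i hsi hlt) hpre]
      simp [← hrn]

-- ---- prefix-sum machinery ----

theorem pv_psum_bump (d : List Int) (a : Nat) (v : Int) (ha : a < d.length) : ∀ m : Nat,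
    pvPsum (d.set a (d.getD a 0 + v)) m = pvPsum d m + if a < m then v else 0 := by
  induction d generalizing a with
  | nil => simp at ha
  | cons x t ih =>
    intro m
    cases a with
    | zero =>
      cases m with
      | zero => simp [pvPsum]
      | succ m => simp [pvPsum]; omega
    | succ a =>
      cases m with
      | zero => simp [pvPsum]
      | succ m =>
        have hat : a < t.length := by simpa using ha
        have := ih a hat m
        simp only [List.set_cons_succ, List.getD_cons_succ, pvPsum, List.take_succ_cons,
          List.sum_cons] at this ⊢
        rw [this]
        by_cases h : a < m <;> simp [h] <;> omega

theorem pv_psum_succ (d : List Int) (m : Nat) (hm : m < d.length) :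
    pvPsum d (m + 1) = pvPsum d m + d.getD m 0 := by
  unfold pvPsum
  have h : d.take (m + 1) = d.take m ++ [d[m]] := by
    rw [List.take_add_one, List.getElem?_eq_getElem hm]; rfl
  rw [h, List.sum_append, List.getD_eq_getElem d 0 hm]
  simp

theorem pv_psum_replicate (n m : Nat) : pvPsum (List.replicate n (0 : Int)) m = 0 := by
  simp [pvPsum, List.take_replicate]

-- ---- the per-keyword interval fold ----

theorem pv_kwfold (limit k : Int) (hL : 0 < limit) (hk : 0 ≤ k) :
    ∀ (occ : List Nat) (h : Int) (d : List Int),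
    (d.length : Int) = limit + 1 →
    occ.Pairwise (· < ·) → (∀ j ∈ occ, h < (j : Int)) →
    (occ.foldl (fun (st : List Int × Int) (j : Nat) => pvAddIntervals limit k st (j : Int)) (d, h)).1.length = d.length ∧
    ∀ i : Nat, (i : Int) < limit →
      pvPsum (occ.foldl (fun (st : List Int × Int) (j : Nat) => pvAddIntervals limit k st (j : Int)) (d, h)).1 (i + 1) =
        pvPsum d (i + 1) +
          (if h < (i : Int) ∧ ∃ j ∈ occ, i ≤ j ∧ (j : Int) + k ≤ (i : Int) + 200 then 1 else 0) := by
  intro occ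
  induction occ with
  | nil =>
    intro h d hlen _ _
    refine ⟨rfl, fun i _ => ?_⟩
    simp
  | cons j rest ih =>
    intro h d hlen hsort hh
    have hhj : h < (j : Int) := hh j List.mem_cons_self
    have hrest : ∀ x ∈ rest, (j : Int) < (x : Int) := by
      intro x hx
      exact_mod_cast (List.pairwise_cons.1 hsort).1 x hx
    set lo := max (max 0 ((j : Int) + k - 200)) (h + 1) with hlo
    set hi2 := min (j : Int) (limit - 1) + 1 with hhi2
    have hlo0 : (0 : Int) ≤ lo := le_trans (le_max_left 0 _) (le_max_left _ _)
    have hhi0 : (0 : Int) ≤ hi2 := by omega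
    simp only [List.foldl_cons]
    by_cases hcond : lo ≤ (j : Int) ∧ lo < limit
    · have hlon : lo = ((lo.toNat : Nat) : Int) := (Int.toNat_of_nonneg hlo0).symm
      have hhin : hi2 = ((hi2.toNat : Nat) : Int) := (Int.toNat_of_nonneg hhi0).symm
      have hlolt : lo.toNat < d.length := by omega
      have hhilt : hi2.toNat < d.length := by omega
      have hstep : pvAddIntervals limit k (d, h) (j : Int) =
          (((d.set lo.toNat (d.getD lo.toNat 0 + 1)).set hi2.toNat
            ((d.set lo.toNat (d.getD lo.toNat 0 + 1)).getD hi2.toNat 0 + (-1))), (j : Int)) := by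
        simp only [pvAddIntervals, ← hlo, ← hhi2]
        rw [if_pos hcond, hlon, hhin]
        simp only [pysem]
        rw [sub_eq_add_neg]
        simp
        rw [max_eq_left hlo0, max_eq_left hhi0]
      rw [hstep]
      have hlen1 : ((d.set lo.toNat (d.getD lo.toNat 0 + 1)).length : Int) = limit + 1 := by
        simpa using hlen
      have hlen2 : (((d.set lo.toNat (d.getD lo.toNat 0 + 1)).set hi2.toNat
          ((d.set lo.toNat (d.getD lo.toNat 0 + 1)).getD hi2.toNat 0 + (-1))).length : Int) =
          limit + 1 := by simpa using hlen
      obtain ⟨ihlen, ihpsum⟩ := ih (j : Int)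
        ((d.set lo.toNat (d.getD lo.toNat 0 + 1)).set hi2.toNat
          ((d.set lo.toNat (d.getD lo.toNat 0 + 1)).getD hi2.toNat 0 + (-1)))
        hlen2 (List.pairwise_cons.1 hsort).2 hrest
      constructor
      · rw [ihlen]; simp
      · intro i hi
        rw [ihpsum i hi]
        rw [pv_psum_bump _ hi2.toNat (-1) (by simpa using hhilt) (i + 1)]
        rw [pv_psum_bump d lo.toNat 1 hlolt (i + 1)]
        have hmem : (∃ x ∈ j :: rest, i ≤ x ∧ (x : Int) + k ≤ (i : Int) + 200) ↔
            ((i ≤ j ∧ (j : Int) + k ≤ (i : Int) + 200) ∨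
              (∃ x ∈ rest, i ≤ x ∧ (x : Int) + k ≤ (i : Int) + 200)) := by
          simp
        rw [if_congr (and_congr_right fun _ => hmem) rfl rfl]
        by_cases hR : ∃ x ∈ rest, i ≤ x ∧ (x : Int) + k ≤ (i : Int) + 200
        · obtain ⟨x, hxmem, hxi, hxk⟩ := hR
          have hjx : (j : Int) < (x : Int) := hrest x hxmem
          have hRtrue : (∃ x ∈ rest, i ≤ x ∧ (x : Int) + k ≤ (i : Int) + 200) := ⟨x, hxmem, hxi, hxk⟩
          rw [if_congr (and_iff_left hRtrue) rfl rfl,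
            if_congr (and_iff_left (Or.inr hRtrue)) rfl rfl]
          clear ih ihlen ihpsum hstep hlen1 hlen2 hmem hsort hh hrest hxmem hlen
          split_ifs <;> omega
        · rw [if_congr (iff_false_intro fun hc : ((j : Int) < (i : Int) ∧ ∃ x ∈ rest, i ≤ x ∧ (x : Int) + k ≤ (i : Int) + 200) => hR hc.2) rfl rfl,
            if_congr (and_congr_right fun _ => or_iff_left hR) rfl rfl]
          simp only [if_false]
          clear ih ihlen ihpsum hstep hlen1 hlen2 hmem hsort hh hrest hlen hR
          split_ifs <;> omega
    · have hstep : pvAddIntervals limit k (d, h) (j : Int) = (d, (j : Int)) := by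
        simp only [pvAddIntervals, ← hlo, ← hhi2]
        rw [if_neg hcond]
      rw [hstep]
      obtain ⟨ihlen, ihpsum⟩ := ih (j : Int) d hlen (List.pairwise_cons.1 hsort).2 hrest
      refine ⟨ihlen, fun i hi => ?_⟩
      rw [ihpsum i hi]
      have hmem : (∃ x ∈ j :: rest, i ≤ x ∧ (x : Int) + k ≤ (i : Int) + 200) ↔
          ((i ≤ j ∧ (j : Int) + k ≤ (i : Int) + 200) ∨
            (∃ x ∈ rest, i ≤ x ∧ (x : Int) + k ≤ (i : Int) + 200)) := by
        simp
      rw [if_congr (and_congr_right fun _ => hmem) rfl rfl]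
      by_cases hR : ∃ x ∈ rest, i ≤ x ∧ (x : Int) + k ≤ (i : Int) + 200
      · obtain ⟨x, hxmem, hxi, hxk⟩ := hR
        have hjx : (j : Int) < (x : Int) := hrest x hxmem
        have hRtrue : (∃ x ∈ rest, i ≤ x ∧ (x : Int) + k ≤ (i : Int) + 200) := ⟨x, hxmem, hxi, hxk⟩
        rw [if_congr (and_iff_left hRtrue) rfl rfl,
          if_congr (and_iff_left (Or.inr hRtrue)) rfl rfl]
        clear ih ihlen ihpsum hstep hmem hsort hh hrest hxmem hlen
        split_ifs <;> omega
      · rw [if_congr (iff_false_intro fun hc : ((j : Int) < (i : Int) ∧ ∃ x ∈ rest, i ≤ x ∧ (x : Int) + k ≤ (i : Int) + 200) => hR hc.2) rfl rfl,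
          if_congr (and_congr_right fun _ => or_iff_left hR) rfl rfl]
        simp only [if_false]
        clear ih ihlen ihpsum hstep hmem hsort hh hrest hlen hR
        split_ifs <;> omega

-- ---- the per-description fold over keywords ----

theorem pv_kwsfold (cl : String) (limit : Int) (hL : 0 < limit)
    (hlim : limit = (cl.toList.length : Int) - 50) (fuel : Nat) (hfuel : cl.toList.length < fuel) :
    ∀ (kws : List String) (d : List Int), (∀ kw ∈ kws, kw.toList ≠ []) →
    (d.length : Int) = limit + 1 →
    (kws.foldl (fun d kw =>
        ((pvOccsGo cl kw fuel (PySem.Str.find cl kw)).foldl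
          (pvAddIntervals limit (PySem.Str.len kw)) (d, -1)).1) d).length = d.length ∧
    ∀ i : Nat, (i : Int) < limit →
      pvPsum (kws.foldl (fun d kw =>
        ((pvOccsGo cl kw fuel (PySem.Str.find cl kw)).foldl
          (pvAddIntervals limit (PySem.Str.len kw)) (d, -1)).1) d) (i + 1) =
      pvPsum d (i + 1) +
        (kws.map (fun kw =>
          if kw.toList <:+: List.take 200 (cl.toList.drop i) then (1 : Int) else 0)).sum := by
  intro kws
  induction kws with
  | nil =>
    intro d _ hlen
    exact ⟨rfl, fun i _ => by simp⟩
  | cons kw rest ih =>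
    intro d hne hlen
    simp only [List.foldl_cons, List.map_cons, List.sum_cons]
    have hkw : kw.toList ≠ [] := hne kw List.mem_cons_self
    have hocc : pvOccsGo cl kw fuel (PySem.Str.find cl kw) =
        List.map (Nat.cast : Nat → Int) (pvOccsFrom cl.toList kw.toList 0) := by
      have h0 := pv_occsGo_spec cl kw hkw fuel 0 (by omega) (by omega)
      rw [← h0]
      congr 1
      rw [PySem.Str.find_eq, ← PySem.Chars.findFrom_zero]
      norm_num
    rw [hocc, List.foldl_map]
    have hk0 : (0 : Int) ≤ PySem.Str.len kw := by
      rw [PySem.Str.len_eq]; positivity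
    obtain ⟨klen, kpsum⟩ := pv_kwfold limit (PySem.Str.len kw) hL hk0
      (pvOccsFrom cl.toList kw.toList 0) (-1) d hlen
      (pv_occsFrom_sorted cl.toList kw.toList 0) (fun j _ => by omega)
    have hlen1 : ((((pvOccsFrom cl.toList kw.toList 0).foldl
        (fun (st : List Int × Int) (j : Nat) =>
          pvAddIntervals limit (PySem.Str.len kw) st (j : Int)) (d, -1)).1).length : Int) =
        limit + 1 := by rw [klen]; exact hlen
    obtain ⟨rlen, rpsum⟩ := ih _ (fun kw' h' => hne kw' (List.mem_cons_of_mem kw h')) hlen1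
    refine ⟨by rw [rlen, klen], fun i hi => ?_⟩
    rw [rpsum i hi, kpsum i hi]
    have hiff : ((-1 : Int) < (i : Int) ∧ ∃ j ∈ pvOccsFrom cl.toList kw.toList 0,
        i ≤ j ∧ (j : Int) + PySem.Str.len kw ≤ (i : Int) + 200) ↔
        kw.toList <:+: List.take 200 (cl.toList.drop i) := by
      rw [pv_window_iff]
      constructor
      · rintro ⟨-, j, hjmem, hij, hjk⟩
        obtain ⟨-, -, hpre⟩ := (pv_mem_occsFrom cl.toList kw.toList 0 j).1 hjmem
        refine ⟨j, hij, ?_, hpre⟩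
        rw [PySem.Str.len_eq] at hjk
        omega
      · rintro ⟨j, hij, hjk, hpre⟩
        have hkl : 0 < kw.toList.length := List.length_pos_of_ne_nil hkw
        have hjN : j ≤ cl.toList.length := by
          have hle := hpre.length_le
          simp only [List.length_drop] at hle
          omega
        refine ⟨by omega, j, (pv_mem_occsFrom cl.toList kw.toList 0 j).2
          ⟨hjN, Nat.zero_le _, hpre⟩, hij, ?_⟩
        rw [PySem.Str.len_eq]
        omega
    rw [if_congr hiff rfl rfl]
    ring

-- ---- the scan ----

theorem pv_scan (d : List Int) (score : Nat → Int) :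
    ∀ m : Nat, m ≤ d.length → (∀ i, i < m → score i = pvPsum d (i + 1)) →
    (List.range m).foldl (fun (st : Int × Int × Int) (i : Nat) =>
        let cur := st.2.2 + d.getD i 0
        if st.2.1 < cur then ((i : Int), cur, cur) else (st.1, st.2.1, cur)) (-1, 0, 0) =
      (((List.range m).foldl (fun (st : Int × Int) (i : Nat) =>
          if st.2 < score i then ((i : Int), score i) else st) (-1, 0)).1,
       ((List.range m).foldl (fun (st : Int × Int) (i : Nat) =>
          if st.2 < score i then ((i : Int), score i) else st) (-1, 0)).2,
       pvPsum d m) := by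
  intro m
  induction m with
  | zero => intro _ _; simp [pvPsum]
  | succ m ih =>
    intro hm hs
    rw [List.range_succ, List.foldl_append, List.foldl_append,
      ih (by omega) (fun i hi => hs i (by omega))]
    simp only [List.foldl_cons, List.foldl_nil]
    rw [← pv_psum_succ d m (by omega), ← hs m (by omega)]
    by_cases h : (((List.range m).foldl (fun (st : Int × Int) (i : Nat) =>
        if st.2 < score i then ((i : Int), score i) else st) (-1, 0)).2 < score m)
    · rw [if_pos h, if_pos h]
    · rw [if_neg h, if_neg h]

-- ---- per-description equality of the two loop results ----

theorem pv_desc (content desc : String) :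
    ((PySem.List.pyRange 0 (PySem.Str.len content - 50) 1).foldl
      (fun (st : Int × Int × Int) (i : Int) =>
        let cur := st.2.2 + PySem.List.pyGetD
          ((PySem.Str.split₀ (PySem.Str.lower desc)).foldl (fun d kw =>
            ((pvOccsGo (PySem.Str.lower content) kw (PySem.Str.len content + 2).toNat
              (PySem.Str.find (PySem.Str.lower content) kw)).foldl
              (pvAddIntervals (PySem.Str.len content - 50) (PySem.Str.len kw)) (d, -1)).1)
            (if 0 < PySem.Str.len content - 50 then
              List.replicate (PySem.Str.len content - 50 + 1).toNat 0 else [])) i 0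
        if st.2.1 < cur then (i, cur, cur) else (st.1, st.2.1, cur)) (-1, 0, 0)).1 =
    ((PySem.List.pyRange 0 (PySem.Str.len (PySem.Str.lower content) - 50) 1).foldl
      (fun (st : Int × Int) (i : Int) =>
        let window := PySem.Str.slice (PySem.Str.lower content) (some i) (some (i + 200))
        let score : Int := ((PySem.Str.split₀ (PySem.Str.lower desc)).map
          (fun kw => if PySem.Str.isIn kw window then (1 : Int) else 0)).sum
        if st.2 < score then (i, score) else st) (-1, 0)).1 := by
  have hlow : PySem.Str.len (PySem.Str.lower content) = PySem.Str.len content := by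
    rw [PySem.Str.len_eq, PySem.Str.len_eq, pv_lower_length]
  rw [hlow]
  by_cases hL : 0 < PySem.Str.len content - 50
  case neg =>
    rw [PySem.List.pyRange_one_eq_nil (by omega)]
    rfl
  case pos =>
    have hn : PySem.Str.len content = (content.toList.length : Int) := PySem.Str.len_eq content
    have hclen : (PySem.Str.lower content).toList.length = content.toList.length :=
      pv_lower_length content
    have hlim : PySem.Str.len content - 50 =
        ((PySem.Str.lower content).toList.length : Int) - 50 := by omega
    have hfuel : (PySem.Str.lower content).toList.length <
        (PySem.Str.len content + 2).toNat := by rw [hclen, hn]; omega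
    have hkws : ∀ kw ∈ PySem.Str.split₀ (PySem.Str.lower desc), kw.toList ≠ [] :=
      fun kw h => pv_split0_ne_nil _ kw h
    have hd0len : ((((if 0 < PySem.Str.len content - 50 then
        List.replicate (PySem.Str.len content - 50 + 1).toNat 0 else []) : List Int)).length : Int) =
        (PySem.Str.len content - 50) + 1 := by
      rw [if_pos hL]
      have hL2 : (0 : Int) < (content.length : Int) - 50 := by
        rw [hn] at hL
        simpa using hL
      simp
      omega
    obtain ⟨dlen, dpsum⟩ := pv_kwsfold (PySem.Str.lower content) (PySem.Str.len content - 50)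
      hL hlim (PySem.Str.len content + 2).toNat hfuel (PySem.Str.split₀ (PySem.Str.lower desc))
      (if 0 < PySem.Str.len content - 50 then
        List.replicate (PySem.Str.len content - 50 + 1).toNat 0 else []) hkws hd0len
    set diff := (PySem.Str.split₀ (PySem.Str.lower desc)).foldl (fun d kw =>
        ((pvOccsGo (PySem.Str.lower content) kw (PySem.Str.len content + 2).toNat
          (PySem.Str.find (PySem.Str.lower content) kw)).foldl
          (pvAddIntervals (PySem.Str.len content - 50) (PySem.Str.len kw)) (d, -1)).1)
        (if 0 < PySem.Str.len content - 50 then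
          List.replicate (PySem.Str.len content - 50 + 1).toNat 0 else []) with hdiff
    have hscore : ∀ i : Nat, i < (PySem.Str.len content - 50).toNat →
        ((PySem.Str.split₀ (PySem.Str.lower desc)).map
          (fun kw => if PySem.Str.isIn kw (PySem.Str.slice (PySem.Str.lower content)
            (some (i : Int)) (some ((i : Int) + 200))) then (1 : Int) else 0)).sum =
        pvPsum diff (i + 1) := by
      intro i hiL
      rw [dpsum i (by omega)]
      rw [if_pos hL, pv_psum_replicate]
      rw [List.map_congr_left (fun kw _ => ?_)]
      · ring
      · have hwin : (PySem.Str.slice (PySem.Str.lower content)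
            (some (i : Int)) (some ((i : Int) + 200))).toList =
            List.take 200 ((PySem.Str.lower content).toList.drop i) := by
          rw [PySem.Str.toList_slice, PySem.Chars.slice_eq_listSlice]
          have h200 : ((i : Int) + 200) = ((i : Int) + ((200 : Nat) : Int)) := by norm_num
          rw [h200, PySem.List.slice_natCast_add]
        refine if_congr ?_ rfl rfl
        rw [PySem.Str.isIn_eq, PySem.Chars.isIn_iff_infix, hwin]
    have hrange : PySem.List.pyRange 0 (PySem.Str.len content - 50) 1 =
        List.map (Nat.cast : Nat → Int) (List.range (PySem.Str.len content - 50).toNat) := by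
      rw [show (PySem.Str.len content - 50) =
        (((PySem.Str.len content - 50).toNat : Nat) : Int) by omega]
      exact PySem.List.pyRange_zero_natCast _
    rw [hrange, List.foldl_map, List.foldl_map]
    have hbfun : (fun (st : Int × Int × Int) (i : Nat) =>
        let cur := st.2.2 + PySem.List.pyGetD diff ((i : Nat) : Int) 0
        if st.2.1 < cur then ((i : Int), cur, cur) else (st.1, st.2.1, cur)) =
        (fun (st : Int × Int × Int) (i : Nat) =>
        let cur := st.2.2 + diff.getD i 0
        if st.2.1 < cur then ((i : Int), cur, cur) else (st.1, st.2.1, cur)) := by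
      funext st i
      simp [pysem]
    rw [hbfun]
    have hdlen2 : (PySem.Str.len content - 50).toNat ≤ diff.length := by
      rw [dlen]
      omega
    rw [pv_scan diff (fun i : Nat => ((PySem.Str.split₀ (PySem.Str.lower desc)).map
        (fun kw => if PySem.Str.isIn kw (PySem.Str.slice (PySem.Str.lower content)
          (some (i : Int)) (some ((i : Int) + 200))) then (1 : Int) else 0)).sum)
      (PySem.Str.len content - 50).toNat hdlen2 hscore]

-- ===== VERDICT (by name: the statement is the Claim_ definition above) =====
theorem find_link_positions_spec : Claim_equal_find_link_positions := by
  intro content pds _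
  unfold Spec_find_link_positions
  have hfun : (fun (positions : List Int) (desc : String) =>
      if 0 ≤ ((PySem.List.pyRange 0 (PySem.Str.len (PySem.Str.lower content) - 50) 1).foldl
          (fun (st : Int × Int) (i : Int) =>
            let window := PySem.Str.slice (PySem.Str.lower content) (some i) (some (i + 200))
            let score : Int := ((PySem.Str.split₀ (PySem.Str.lower desc)).map
              (fun kw => if PySem.Str.isIn kw window then (1 : Int) else 0)).sum
            if st.2 < score then (i, score) else st) (-1, 0)).1 then
        positions ++ [((PySem.List.pyRange 0 (PySem.Str.len (PySem.Str.lower content) - 50) 1).foldl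
          (fun (st : Int × Int) (i : Int) =>
            let window := PySem.Str.slice (PySem.Str.lower content) (some i) (some (i + 200))
            let score : Int := ((PySem.Str.split₀ (PySem.Str.lower desc)).map
              (fun kw => if PySem.Str.isIn kw window then (1 : Int) else 0)).sum
            if st.2 < score then (i, score) else st) (-1, 0)).1]
      else positions ++ [PySem.Int.floordiv (PySem.Str.len content)
        (PySem.List.len pds + 1) * (PySem.List.len positions + 1)]) =
      (fun (positions : List Int) (desc : String) =>
      if 0 ≤ ((PySem.List.pyRange 0 (PySem.Str.len content - 50) 1).foldl
          (fun (st : Int × Int × Int) (i : Int) =>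
            let cur := st.2.2 + PySem.List.pyGetD
              ((PySem.Str.split₀ (PySem.Str.lower desc)).foldl (fun d kw =>
                ((pvOccsGo (PySem.Str.lower content) kw (PySem.Str.len content + 2).toNat
                  (PySem.Str.find (PySem.Str.lower content) kw)).foldl
                  (pvAddIntervals (PySem.Str.len content - 50) (PySem.Str.len kw)) (d, -1)).1)
                (if 0 < PySem.Str.len content - 50 then
                  List.replicate (PySem.Str.len content - 50 + 1).toNat 0 else [])) i 0
            if st.2.1 < cur then (i, cur, cur) else (st.1, st.2.1, cur)) (-1, 0, 0)).1 then
        positions ++ [((PySem.List.pyRange 0 (PySem.Str.len content - 50) 1).foldl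
          (fun (st : Int × Int × Int) (i : Int) =>
            let cur := st.2.2 + PySem.List.pyGetD
              ((PySem.Str.split₀ (PySem.Str.lower desc)).foldl (fun d kw =>
                ((pvOccsGo (PySem.Str.lower content) kw (PySem.Str.len content + 2).toNat
                  (PySem.Str.find (PySem.Str.lower content) kw)).foldl
                  (pvAddIntervals (PySem.Str.len content - 50) (PySem.Str.len kw)) (d, -1)).1)
                (if 0 < PySem.Str.len content - 50 then
                  List.replicate (PySem.Str.len content - 50 + 1).toNat 0 else [])) i 0
            if st.2.1 < cur then (i, cur, cur) else (st.1, st.2.1, cur)) (-1, 0, 0)).1]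
      else positions ++ [PySem.Int.floordiv (PySem.Str.len content)
        (PySem.List.len pds + 1) * (PySem.List.len positions + 1)]) := by
    funext positions desc
    rw [pv_desc content desc]
  show pds.foldl _ [] = pds.foldl _ []
  rw [hfun]
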